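-- pv_equiv track=rewrite | github.com/ketema/Euler_Problems | problem11/python/matrix_product.py | find_max_product_sequence
-- ===== SOURCE A (Python) =====
-- def find_max_product_sequence(matrix, n):
--     best = (0, [])
--     rows = len(matrix)
--     cols = len(matrix[0]) if rows else 0
--     # Right
--     for r in range(rows):
--         for c in range(cols - n + 1):
--             coords = [(r, c+i) for i in range(n)]
--             prod = 1
--             for i in range(n):
--                 prod *= matrix[r][c+i]
--             if prod > best[0]:
--                 best = (prod, coords)
--     # Down
--     for r in range(rows - n + 1):
--         for c in range(cols):
--             coords = [(r+i, c) for i in range(n)]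
--             prod = 1
--             for i in range(n):
--                 prod *= matrix[r+i][c]
--             if prod > best[0]:
--                 best = (prod, coords)
--     # Diagonal down-right
--     for r in range(rows - n + 1):
--         for c in range(cols - n + 1):
--             coords = [(r+i, c+i) for i in range(n)]
--             prod = 1
--             for i in range(n):
--                 prod *= matrix[r+i][c+i]
--             if prod > best[0]:
--                 best = (prod, coords)
--     # Diagonal down-left
--     for r in range(rows - n + 1):
--         for c in range(n - 1, cols):
--             coords = [(r+i, c-i) for i in range(n)]
--             prod = 1
--             for i in range(n):
--                 prod *= matrix[r+i][c-i]
--             if prod > best[0]: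
--                 best = (prod, coords)
--     return best
-- ===== SOURCE B (Python) =====
-- def find_max_product_sequence(matrix, n):
--     rows = len(matrix)
--     cols = len(matrix[0]) if rows else 0
--     if n <= 0:
--         # an empty window has product 1, which beats the initial 0
--         return (1, [])
--     if n > rows and n > cols:
--         # no direction can fit a window of length n
--         return (0, [])
--
--     def prefixes(vals):
--         # zs[k] = number of zeros among vals[:k]; ps[k] = product of the nonzeros of vals[:k]
--         zs = [0]
--         ps = [1]
--         for v in vals:
--             zs.append(zs[-1] + (1 if v == 0 else 0))
--             ps.append(ps[-1] * (1 if v == 0 else v))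
--         return (zs, ps)
--
--     def window(pre, j):
--         # product of n consecutive values starting at position j, in O(1)
--         zs, ps = pre
--         if zs[j + n] > zs[j]:
--             return 0
--         return ps[j + n] // ps[j]
--
--     rowpre = [prefixes([matrix[r][c] for c in range(cols)]) for r in range(rows)]
--     colpre = [prefixes([matrix[r][c] for r in range(rows)]) for c in range(cols)]
--     drpre = {d: prefixes([matrix[r][r + d] for r in range(max(0, -d), min(rows, cols - d))])
--              for d in range(-rows + 1, cols)}
--     dlpre = {s: prefixes([matrix[r][s - r] for r in range(max(0, s - cols + 1), min(rows, s + 1))])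
--              for s in range(rows + cols - 1)}
--
--     best = (0, [])
--     for r in range(rows):
--         for c in range(cols - n + 1):
--             p = window(rowpre[r], c)
--             if p > best[0]:
--                 best = (p, [(r, c + i) for i in range(n)])
--     for r in range(rows - n + 1):
--         for c in range(cols):
--             p = window(colpre[c], r)
--             if p > best[0]:
--                 best = (p, [(r + i, c) for i in range(n)])
--     for r in range(rows - n + 1):
--         for c in range(cols - n + 1):
--             p = window(drpre[c - r], r - max(0, r - c))
--             if p > best[0]:
--                 best = (p, [(r + i, c + i) for i in range(n)])
--     for r in range(rows - n + 1):
--         for c in range(n - 1, cols):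
--             p = window(dlpre[r + c], r - max(0, r + c - cols + 1))
--             if p > best[0]:
--                 best = (p, [(r + i, c - i) for i in range(n)])
--     return best
-- ===== Notes on version B (the rewrite author's own statement) =====
-- stated objective: alternative
-- what changed: B precomputes zero-count and nonzero-product prefix tables for every row, column and diagonal of both slants, so each window product becomes an O(1) table lookup with exact division instead of A's O(n) inner multiplication loop (an asymptotic win only for large window lengths n).
import Mathlib
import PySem

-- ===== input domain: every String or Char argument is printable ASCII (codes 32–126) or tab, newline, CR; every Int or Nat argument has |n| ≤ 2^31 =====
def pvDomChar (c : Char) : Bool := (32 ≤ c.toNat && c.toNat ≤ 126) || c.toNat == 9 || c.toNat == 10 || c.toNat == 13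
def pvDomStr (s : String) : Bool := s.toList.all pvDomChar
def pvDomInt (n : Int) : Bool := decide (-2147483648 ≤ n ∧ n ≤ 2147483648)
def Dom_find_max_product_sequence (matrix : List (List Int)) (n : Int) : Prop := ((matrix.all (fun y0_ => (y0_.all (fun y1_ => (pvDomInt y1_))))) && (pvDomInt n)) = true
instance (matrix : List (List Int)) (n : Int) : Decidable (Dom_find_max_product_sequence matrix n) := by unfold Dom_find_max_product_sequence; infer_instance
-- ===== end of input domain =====

-- B replaces A's inner product loop by lookups in per-line (row/column/diagonal)
-- zero-count and nonzero-product prefix tables: a genuinely different exact algorithm.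

-- ===== PORT A =====
-- matrix[r][c] (both indices in range on every admitted input; pyGetD is Python indexing)
def pyAt (matrix : List (List Int)) (r c : Int) : Int :=
  PySem.List.pyGetD (PySem.List.pyGetD matrix r []) c 0

def find_max_product_sequence (matrix : List (List Int)) (n : Int) : Int × (List (Int × Int)) :=
  let best : Int × List (Int × Int) := (0, [])
  let rows : Int := matrix.length
  let cols : Int := if matrix.length ≠ 0 then ((matrix.headD []).length : Int) else 0
  -- Right
  let best := (PySem.List.pyRange 0 rows 1).foldl (fun best r =>
    (PySem.List.pyRange 0 (cols - n + 1) 1).foldl (fun best c =>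
      let coords := (PySem.List.pyRange 0 n 1).map (fun i => (r, c + i))
      let prod := (PySem.List.pyRange 0 n 1).foldl (fun p i => p * pyAt matrix r (c + i)) 1
      if prod > best.1 then (prod, coords) else best) best) best
  -- Down
  let best := (PySem.List.pyRange 0 (rows - n + 1) 1).foldl (fun best r =>
    (PySem.List.pyRange 0 cols 1).foldl (fun best c =>
      let coords := (PySem.List.pyRange 0 n 1).map (fun i => (r + i, c))
      let prod := (PySem.List.pyRange 0 n 1).foldl (fun p i => p * pyAt matrix (r + i) c) 1
      if prod > best.1 then (prod, coords) else best) best) best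
  -- Diagonal down-right
  let best := (PySem.List.pyRange 0 (rows - n + 1) 1).foldl (fun best r =>
    (PySem.List.pyRange 0 (cols - n + 1) 1).foldl (fun best c =>
      let coords := (PySem.List.pyRange 0 n 1).map (fun i => (r + i, c + i))
      let prod := (PySem.List.pyRange 0 n 1).foldl (fun p i => p * pyAt matrix (r + i) (c + i)) 1
      if prod > best.1 then (prod, coords) else best) best) best
  -- Diagonal down-left
  let best := (PySem.List.pyRange 0 (rows - n + 1) 1).foldl (fun best r =>
    (PySem.List.pyRange (n - 1) cols 1).foldl (fun best c =>
      let coords := (PySem.List.pyRange 0 n 1).map (fun i => (r + i, c - i))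
      let prod := (PySem.List.pyRange 0 n 1).foldl (fun p i => p * pyAt matrix (r + i) (c - i)) 1
      if prod > best.1 then (prod, coords) else best) best) best
  best

-- ===== PORT B =====
-- prefixes(vals): zs[k] = zeros among vals[:k], ps[k] = product of the nonzeros of vals[:k]
def prefixesB (vals : List Int) : List Int × List Int :=
  vals.foldl (fun zp v =>
    (zp.1 ++ [PySem.List.pyGetD zp.1 (-1) 0 + (if v = 0 then 1 else 0)],
     zp.2 ++ [PySem.List.pyGetD zp.2 (-1) 0 * (if v = 0 then 1 else v)])) ([0], [1])

-- window(pre, j): product of the n values starting at position j, in O(1)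
def windowB (n : Int) (pre : List Int × List Int) (j : Int) : Int :=
  if PySem.List.pyGetD pre.1 (j + n) 0 > PySem.List.pyGetD pre.1 j 0 then 0
  else PySem.Int.floordiv (PySem.List.pyGetD pre.2 (j + n) 0) (PySem.List.pyGetD pre.2 j 0)

def find_max_product_sequence_alt (matrix : List (List Int)) (n : Int) : Int × (List (Int × Int)) :=
  let rows : Int := matrix.length
  let cols : Int := if matrix.length ≠ 0 then ((matrix.headD []).length : Int) else 0
  if n ≤ 0 then (1, [])           -- an empty window has product 1, which beats the initial 0
  else if rows < n ∧ cols < n then (0, [])   -- no direction can fit a window of length n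
  else
    let rowpre := (PySem.List.pyRange 0 rows 1).map (fun r =>
      prefixesB ((PySem.List.pyRange 0 cols 1).map (fun c => pyAt matrix r c)))
    let colpre := (PySem.List.pyRange 0 cols 1).map (fun c =>
      prefixesB ((PySem.List.pyRange 0 rows 1).map (fun r => pyAt matrix r c)))
    let drpre : PySem.Dict Int (List Int × List Int) :=
      (PySem.List.pyRange (-rows + 1) cols 1).foldl (fun dct d =>
        dct.insert d (prefixesB ((PySem.List.pyRange (max 0 (-d)) (min rows (cols - d)) 1).map
          (fun r => pyAt matrix r (r + d))))) PySem.Dict.empty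
    let dlpre : PySem.Dict Int (List Int × List Int) :=
      (PySem.List.pyRange 0 (rows + cols - 1) 1).foldl (fun dct s =>
        dct.insert s (prefixesB ((PySem.List.pyRange (max 0 (s - cols + 1)) (min rows (s + 1)) 1).map
          (fun r => pyAt matrix r (s - r))))) PySem.Dict.empty
    let best : Int × List (Int × Int) := (0, [])
    let best := (PySem.List.pyRange 0 rows 1).foldl (fun best r =>
      (PySem.List.pyRange 0 (cols - n + 1) 1).foldl (fun best c =>
        let p := windowB n (PySem.List.pyGetD rowpre r ([], [])) c
        if p > best.1 then (p, (PySem.List.pyRange 0 n 1).map (fun i => (r, c + i))) else best) best) best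
    let best := (PySem.List.pyRange 0 (rows - n + 1) 1).foldl (fun best r =>
      (PySem.List.pyRange 0 cols 1).foldl (fun best c =>
        let p := windowB n (PySem.List.pyGetD colpre c ([], [])) r
        if p > best.1 then (p, (PySem.List.pyRange 0 n 1).map (fun i => (r + i, c))) else best) best) best
    let best := (PySem.List.pyRange 0 (rows - n + 1) 1).foldl (fun best r =>
      (PySem.List.pyRange 0 (cols - n + 1) 1).foldl (fun best c =>
        let p := windowB n (PySem.Dict.getD drpre (c - r) ([], [])) (r - max 0 (r - c))
        if p > best.1 then (p, (PySem.List.pyRange 0 n 1).map (fun i => (r + i, c + i))) else best) best) best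
    let best := (PySem.List.pyRange 0 (rows - n + 1) 1).foldl (fun best r =>
      (PySem.List.pyRange (n - 1) cols 1).foldl (fun best c =>
        let p := windowB n (PySem.Dict.getD dlpre (r + c) ([], [])) (r - max 0 (r + c - cols + 1))
        if p > best.1 then (p, (PySem.List.pyRange 0 n 1).map (fun i => (r + i, c - i))) else best) best) best
    best

-- ===== PRECONDITION & SPEC =====
-- Exactly where the Python A returns: with a positive window that fits in some direction, A reads
-- every row at all columns below the first row's length, so shorter rows raise IndexError.
def Pre_find_max_product_sequence (matrix : List (List Int)) (n : Int) : Prop :=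
  n ≤ 0 ∨ ((matrix.length : Int) < n ∧ ((matrix.headD []).length : Int) < n) ∨
    (∀ row ∈ matrix, (matrix.headD []).length ≤ row.length)
instance (matrix : List (List Int)) (n : Int) : Decidable (Pre_find_max_product_sequence matrix n) := by
  unfold Pre_find_max_product_sequence; infer_instance
def pvWitness_find_max_product_sequence : List (List Int) × Int := ([[1, -2], [3, 4]], 2)

def Spec_find_max_product_sequence (matrix : List (List Int)) (n : Int) (out : Int × (List (Int × Int))) : Prop := out = find_max_product_sequence_alt matrix n
instance (matrix : List (List Int)) (n : Int) (out : Int × (List (Int × Int))) : Decidable (Spec_find_max_product_sequence matrix n out) := by unfold Spec_find_max_product_sequence; infer_instance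

-- ===== CLAIM (what is proved, stated in full; the proofs are below) =====
def Claim_equal_find_max_product_sequence : Prop := ∀ (matrix : List (List Int)) (n : Int), Dom_find_max_product_sequence matrix n → Pre_find_max_product_sequence matrix n → Spec_find_max_product_sequence matrix n (find_max_product_sequence matrix n)

-- ===== LEMMAS AND PROOFS =====

-- a running product loop is the product of the mapped list
lemma foldl_mul_eq_prod (l : List Int) (g : Int → Int) (a : Int) :
    l.foldl (fun p i => p * g i) a = a * (l.map g).prod := by
  induction l generalizing a with
  | nil => simp
  | cons x t ih => simp [ih, mul_assoc]

-- the window [j, j+n) of a line built as a map over pyRange lo hi 1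
lemma line_window (f : Int → Int) (lo hi j n : Int) (hj : 0 ≤ j)
    (hhi : lo + j + n ≤ hi) :
    (((PySem.List.pyRange lo hi 1).map f).drop j.toNat).take n.toNat
      = (PySem.List.pyRange 0 n 1).map (fun i => f (lo + j + i)) := by
  apply List.ext_getElem
  · simp [PySem.List.length_pyRange_one]; omega
  · intro k h1 h2
    simp only [List.getElem_take, List.getElem_drop, List.getElem_map,
      PySem.List.getElem_pyRange_one]
    congr 1
    simp [PySem.List.length_pyRange_one] at h1 h2 ⊢
    omega

-- characterization of the prefix tables
lemma prefixes_spec (vs : List Int) :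
    prefixesB vs =
      ((List.range (vs.length + 1)).map (fun k => ((vs.take k).count 0 : Int)),
       (List.range (vs.length + 1)).map (fun k => ((vs.take k).filter (fun v => v ≠ 0)).prod)) := by
  induction vs using List.reverseRecOn with
  | nil => simp [prefixesB, List.range_succ]
  | append_singleton vs v ih =>
      unfold prefixesB at ih ⊢
      rw [List.foldl_append, ih]
      simp only [List.foldl_cons, List.foldl_nil, List.length_append, List.length_singleton,
        List.range_succ, List.map_append, List.map_cons, List.map_nil, List.append_assoc]
      have htk : ∀ k, k ≤ vs.length → List.take k (vs ++ [v]) = List.take k vs := by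
        intro k hk; rw [List.take_append_of_le_length hk]
      have hA : ∀ (g : List Int → Int),
          (List.range vs.length).map (fun k => g ((vs ++ [v]).take k))
            = (List.range vs.length).map (fun k => g (vs.take k)) := by
        intro g
        exact List.map_congr_left (fun k hk => by
          rw [htk k (Nat.le_of_lt (List.mem_range.mp hk))])
      have hfull : (vs ++ [v]).take (vs.length + 1) = vs ++ [v] := by
        rw [List.take_of_length_le (by simp)]
      rw [hA (fun l => ((l.count 0 : Nat) : Int)), hA (fun l => (l.filter (fun v => v ≠ 0)).prod),
        htk vs.length le_rfl, List.take_length, hfull]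
      simp only [Prod.mk.injEq, PySem.List.pyGetD_neg_one_append_singleton]
      constructor
      · congr 1
        rw [List.count_append]
        by_cases hv : v = 0 <;> simp [hv]
      · congr 1
        rw [List.filter_append, List.prod_append]
        by_cases hv : v = 0 <;> simp [hv]

-- exact division: (P * q) // P = q for P ≠ 0
lemma exact_floordiv (P q : Int) (hP : P ≠ 0) : PySem.Int.floordiv (P * q) P = q := by
  have hm : PySem.Int.mod (P * q) P = 0 := (PySem.Int.mod_eq_zero_iff_dvd _ _).mpr ⟨q, rfl⟩
  have h := PySem.Int.floordiv_mul_add_mod (P * q) P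
  rw [hm, add_zero] at h
  have h2 : PySem.Int.floordiv (P * q) P * P = q * P := by rw [h]; ring
  exact mul_right_cancel₀ hP h2

-- the O(1) window lookup equals the window's product
lemma window_eq (vs : List Int) (n j : Int) (hj : 0 ≤ j) (hn : 0 ≤ n)
    (hlen : j + n ≤ (vs.length : Int)) :
    windowB n (prefixesB vs) j = ((vs.drop j.toNat).take n.toNat).prod := by
  lift j to ℕ using hj with j'
  lift n to ℕ using hn with n'
  have hjn : (j' : Int) + n' = ((j' + n' : Nat) : Int) := by push_cast; ring
  have hlt : j' + n' < vs.length + 1 := by omega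
  have hlt' : j' < vs.length + 1 := by omega
  set w := (vs.drop (j' : Int).toNat).take (n' : Int).toNat with hw
  have hw' : w = (vs.drop j').take n' := by simp [hw]
  have hsplit : vs.take (j' + n') = vs.take j' ++ w := by rw [hw']; exact List.take_add
  rw [windowB, prefixes_spec]
  simp only [hjn, PySem.List.pyGetD_natCast,
    PySem.List.getD_map_range _ _ _ _ hlt, PySem.List.getD_map_range _ _ _ _ hlt']
  rw [hsplit]
  by_cases h0 : (0 : Int) ∈ w
  · rw [if_pos]
    · exact (List.prod_eq_zero h0).symm
    · have : 0 < w.count 0 := List.count_pos_iff.mpr h0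
      rw [List.count_append]; push_cast; omega
  · rw [if_neg]
    · have hfw : w.filter (fun v => v ≠ 0) = w := by
        rw [List.filter_eq_self]; intro a ha; simp; intro h; exact h0 (h ▸ ha)
      rw [List.filter_append, List.prod_append, hfw]
      have hP : ((vs.take j').filter (fun v => v ≠ 0)).prod ≠ 0 := by
        apply List.prod_ne_zero
        intro hmem
        have := List.of_mem_filter hmem
        simp at this
      exact exact_floordiv _ _ hP
    · have : w.count 0 = 0 := List.count_eq_zero.mpr h0
      rw [List.count_append]; push_cast; omega

-- combine the three: a naive window product equals the table lookup, generically over a line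
lemma cand_gen (f g : Int → Int) (lo hi j n : Int) (hj : 0 ≤ j) (hn : 0 ≤ n)
    (hhi : lo + j + n ≤ hi)
    (hfg : ∀ i, 0 ≤ i → i < n → f (lo + j + i) = g i) :
    (PySem.List.pyRange 0 n 1).foldl (fun p i => p * g i) 1
      = windowB n (prefixesB ((PySem.List.pyRange lo hi 1).map f)) j := by
  rw [foldl_mul_eq_prod, one_mul,
    window_eq _ n j hj hn (by simp only [List.length_map, PySem.List.length_pyRange_one]; omega),
    line_window f lo hi j n hj hhi]
  congr 1
  apply List.map_congr_left
  intro i hi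
  have h := PySem.List.mem_pyRange_one.mp hi
  exact (hfg i h.1 h.2).symm

-- dict built by inserting (k, f k) over a key list: lookups
lemma getD_foldl_insert_not_mem {α : Type} (f : Int → α) (l : List Int)
    (d : PySem.Dict Int α) (k : Int) (dflt : α) (h : k ∉ l) :
    PySem.Dict.getD (l.foldl (fun dct x => dct.insert x (f x)) d) k dflt
      = PySem.Dict.getD d k dflt := by
  induction l generalizing d with
  | nil => rfl
  | cons x t ih =>
      simp only [List.mem_cons, not_or] at h
      rw [List.foldl_cons, ih _ h.2, PySem.Dict.getD_insert_of_ne _ _ _ h.1]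

lemma getD_foldl_insert_mem {α : Type} (f : Int → α) (l : List Int)
    (d : PySem.Dict Int α) (k : Int) (dflt : α) (h : k ∈ l) :
    PySem.Dict.getD (l.foldl (fun dct x => dct.insert x (f x)) d) k dflt = f k := by
  induction l generalizing d with
  | nil => simp at h
  | cons x t ih =>
      by_cases ht : k ∈ t
      · simp only [List.foldl_cons, ih _ ht]
      · have hx : k = x := by rcases List.mem_cons.mp h with h | h; exact h; exact absurd h ht
        subst hx
        simp only [List.foldl_cons, getD_foldl_insert_not_mem _ _ _ _ _ ht,
          PySem.Dict.getD_insert_self]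

-- ===== per-direction candidate-value equalities =====

lemma cand_right (matrix : List (List Int)) (n r c cols : Int)
    (hn : 1 ≤ n) (hc : 0 ≤ c) (hcn : c + n ≤ cols) :
    (PySem.List.pyRange 0 n 1).foldl (fun p i => p * pyAt matrix r (c + i)) 1
      = windowB n (prefixesB ((PySem.List.pyRange 0 cols 1).map (fun cc => pyAt matrix r cc))) c := by
  refine cand_gen _ _ 0 cols c n hc (by omega) (by omega) ?_
  intro i _ _
  have e : 0 + c + i = c + i := by ring
  rw [e]

lemma cand_down (matrix : List (List Int)) (n r c rows : Int)
    (hn : 1 ≤ n) (hr : 0 ≤ r) (hrn : r + n ≤ rows) :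
    (PySem.List.pyRange 0 n 1).foldl (fun p i => p * pyAt matrix (r + i) c) 1
      = windowB n (prefixesB ((PySem.List.pyRange 0 rows 1).map (fun rr => pyAt matrix rr c))) r := by
  refine cand_gen _ _ 0 rows r n hr (by omega) (by omega) ?_
  intro i _ _
  have e : 0 + r + i = r + i := by ring
  rw [e]

lemma cand_dr (matrix : List (List Int)) (n r c rows cols : Int)
    (hn : 1 ≤ n) (hr : 0 ≤ r) (hc : 0 ≤ c) (hrn : r + n ≤ rows) (hcn : c + n ≤ cols) :
    (PySem.List.pyRange 0 n 1).foldl (fun p i => p * pyAt matrix (r + i) (c + i)) 1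
      = windowB n (prefixesB ((PySem.List.pyRange (max 0 (-(c - r))) (min rows (cols - (c - r))) 1).map
          (fun rr => pyAt matrix rr (rr + (c - r))))) (r - max 0 (r - c)) := by
  refine cand_gen _ _ (max 0 (-(c - r))) (min rows (cols - (c - r))) (r - max 0 (r - c)) n
    (by omega) (by omega) (by omega) ?_
  intro i _ _
  have e : max 0 (-(c - r)) + (r - max 0 (r - c)) + i = r + i := by omega
  rw [e]
  have e2 : r + i + (c - r) = c + i := by ring
  rw [e2]

lemma cand_dl (matrix : List (List Int)) (n r c rows cols : Int)
    (hn : 1 ≤ n) (hr : 0 ≤ r) (hc : n - 1 ≤ c) (hrn : r + n ≤ rows) (hcn : c < cols) :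
    (PySem.List.pyRange 0 n 1).foldl (fun p i => p * pyAt matrix (r + i) (c - i)) 1
      = windowB n (prefixesB ((PySem.List.pyRange (max 0 (r + c - cols + 1)) (min rows (r + c + 1)) 1).map
          (fun rr => pyAt matrix rr (r + c - rr)))) (r - max 0 (r + c - cols + 1)) := by
  refine cand_gen _ _ (max 0 (r + c - cols + 1)) (min rows (r + c + 1)) (r - max 0 (r + c - cols + 1)) n
    (by omega) (by omega) (by omega) ?_
  intro i _ _
  have e : max 0 (r + c - cols + 1) + (r - max 0 (r + c - cols + 1)) + i = r + i := by omega
  rw [e]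
  have e2 : r + c - (r + i) = c - i := by ring
  rw [e2]

-- ===== the three cases of the equivalence =====

-- fold of the degenerate (n ≤ 0) candidate step: any nonempty range saturates the best at (1, [])
lemma constFold (l : List Int) (h : l ≠ []) (b : Int × List (Int × Int)) :
    l.foldl (fun best _ => if 1 > best.1 then ((1 : Int), ([] : List (Int × Int))) else best) b
      = if 1 > b.1 then (1, []) else b := by
  induction l generalizing b with
  | nil => exact absurd rfl h
  | cons x t ih =>
      rw [List.foldl_cons]
      cases t with
      | nil => simp
      | cons y u =>
          rw [ih (by simp)]
          by_cases hb : (1 : Int) > b.1 <;> simp [hb]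

-- nested folds with equal step functions on their ranges, threading the accumulator
lemma foldl_congr_init {α β : Type} (l : List α) (f g : β → α → β) {i1 i2 : β}
    (hinit : i1 = i2) (h : ∀ acc, ∀ x ∈ l, f acc x = g acc x) :
    l.foldl f i1 = l.foldl g i2 := by
  subst hinit; exact PySem.List.foldl_congr_mem l f g i1 h

lemma A_nonpos (matrix : List (List Int)) (n : Int) (hn : n ≤ 0) :
    find_max_product_sequence matrix n = (1, []) := by
  simp only [find_max_product_sequence, PySem.List.pyRange_one_eq_nil hn,
    List.map_nil, List.foldl_nil]
  by_cases hm : matrix.length = 0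
  · have hcols0 : (if matrix.length ≠ 0 then ((matrix.headD []).length : Int) else 0) = 0 := by
      rw [if_neg]; omega
    rw [hcols0]
    have hrnil : PySem.List.pyRange 0 ((matrix.length : Int)) = [] :=
      PySem.List.pyRange_one_eq_nil (by omega)
    have hcnil : PySem.List.pyRange 0 (0 : Int) = [] := PySem.List.pyRange_one_eq_nil le_rfl
    have hne3 : PySem.List.pyRange 0 ((0 : Int) - n + 1) ≠ [] := by
      rw [PySem.List.pyRange_one_cons (by omega)]; simp
    have hne3' : PySem.List.pyRange 0 ((matrix.length : Int) - n + 1) ≠ [] := by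
      rw [PySem.List.pyRange_one_cons (by omega)]; simp
    have hne4 : PySem.List.pyRange (n - 1) (0 : Int) ≠ [] := by
      rw [PySem.List.pyRange_one_cons (by omega)]; simp
    simp only [hrnil, hcnil, List.foldl_nil, PySem.List.foldl_ignore,
      constFold _ hne3, constFold _ hne4]
    rw [constFold _ hne3', constFold _ hne3']
    norm_num
  · have hcol : (if matrix.length ≠ 0 then ((matrix.headD []).length : Int) else 0)
        = ((matrix.headD []).length : Int) := if_pos hm
    rw [hcol]
    have hner : PySem.List.pyRange 0 ((matrix.length : Int)) ≠ [] := by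
      rw [PySem.List.pyRange_one_cons (by omega)]; simp
    have hner2 : PySem.List.pyRange 0 ((matrix.length : Int) - n + 1) ≠ [] := by
      rw [PySem.List.pyRange_one_cons (by omega)]; simp
    have hnec1 : PySem.List.pyRange 0 (((matrix.headD []).length : Int) - n + 1) ≠ [] := by
      rw [PySem.List.pyRange_one_cons (by omega)]; simp
    have hnec4 : PySem.List.pyRange (n - 1) ((matrix.headD []).length : Int) ≠ [] := by
      rw [PySem.List.pyRange_one_cons (by omega)]; simp
    simp only [constFold _ hnec1, constFold _ hnec4]
    rw [constFold _ hner, if_pos (by norm_num)]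
    have hmid : List.foldl (fun (best : Int × List (Int × Int)) (_ : Int) =>
        List.foldl (fun best _ => if 1 > best.1 then ((1 : Int), ([] : List (Int × Int))) else best)
          best (PySem.List.pyRange 0 ((matrix.headD []).length : Int)))
        ((1 : Int), ([] : List (Int × Int)))
        (PySem.List.pyRange 0 ((matrix.length : Int) - n + 1)) = ((1 : Int), []) := by
      refine List.foldl_fixed' ?_ _
      intro b
      refine List.foldl_fixed' ?_ _
      intro c
      norm_num
    rw [hmid, constFold _ hner2, constFold _ hner2]
    norm_num

lemma A_toolarge (matrix : List (List Int)) (n : Int) (_hn : 1 ≤ n)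
    (hr : (matrix.length : Int) < n)
    (hc : (if matrix.length ≠ 0 then ((matrix.headD []).length : Int) else 0) < n) :
    find_max_product_sequence matrix n = (0, []) := by
  simp only [find_max_product_sequence]
  have h1 : PySem.List.pyRange 0
      ((if matrix.length ≠ 0 then ((matrix.headD []).length : Int) else 0) - n + 1) = [] :=
    PySem.List.pyRange_one_eq_nil (by omega)
  have h2 : PySem.List.pyRange 0 ((matrix.length : Int) - n + 1) = [] :=
    PySem.List.pyRange_one_eq_nil (by omega)
  simp only [h1, h2, List.foldl_nil, PySem.List.foldl_ignore]

lemma AB_main (matrix : List (List Int)) (n : Int) (hn : 1 ≤ n)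
    (hg : ¬ ((matrix.length : Int) < n ∧
      (if matrix.length ≠ 0 then ((matrix.headD []).length : Int) else 0) < n)) :
    find_max_product_sequence matrix n = find_max_product_sequence_alt matrix n := by
  have hn0 : ¬ n ≤ 0 := by omega
  simp only [find_max_product_sequence, find_max_product_sequence_alt, if_neg hn0, if_neg hg]
  have hc0 : 0 ≤ (if matrix.length ≠ 0 then ((matrix.headD []).length : Int) else 0) := by
    split <;> simp
  -- Diagonal down-left block
  refine foldl_congr_init _ _ _ ?_ ?_
  · -- Diagonal down-right block
    refine foldl_congr_init _ _ _ ?_ ?_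
    · -- Down block
      refine foldl_congr_init _ _ _ ?_ ?_
      · -- Right block
        refine foldl_congr_init _ _ _ rfl ?_
        intro acc r hr
        refine foldl_congr_init _ _ _ rfl ?_
        intro acc2 c hc
        have hrb := PySem.List.mem_pyRange_one.mp hr
        have hcb := PySem.List.mem_pyRange_one.mp hc
        rw [PySem.List.pyGetD_map_pyRange_of_nonneg _ _ _ _ hrb.1 hrb.2,
          ← cand_right matrix n r c _ hn hcb.1 (by omega)]
      · intro acc r hr
        refine foldl_congr_init _ _ _ rfl ?_
        intro acc2 c hc
        have hrb := PySem.List.mem_pyRange_one.mp hr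
        have hcb := PySem.List.mem_pyRange_one.mp hc
        rw [PySem.List.pyGetD_map_pyRange_of_nonneg _ _ _ _ hcb.1 hcb.2,
          ← cand_down matrix n r c _ hn hrb.1 (by omega)]
    · intro acc r hr
      refine foldl_congr_init _ _ _ rfl ?_
      intro acc2 c hc
      have hrb := PySem.List.mem_pyRange_one.mp hr
      have hcb := PySem.List.mem_pyRange_one.mp hc
      have hmem : c - r ∈ PySem.List.pyRange (-(matrix.length : Int) + 1)
          (if matrix.length ≠ 0 then ((matrix.headD []).length : Int) else 0) :=
        PySem.List.mem_pyRange_one.mpr ⟨by omega, by omega⟩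
      rw [getD_foldl_insert_mem _ _ _ _ _ hmem]
      rw [← cand_dr matrix n r c (matrix.length : Int) _ hn hrb.1 hcb.1 (by omega) (by omega)]
  · intro acc r hr
    refine foldl_congr_init _ _ _ rfl ?_
    intro acc2 c hc
    have hrb := PySem.List.mem_pyRange_one.mp hr
    have hcb := PySem.List.mem_pyRange_one.mp hc
    have hmem : r + c ∈ PySem.List.pyRange 0
        ((matrix.length : Int) + (if matrix.length ≠ 0 then ((matrix.headD []).length : Int) else 0) - 1) :=
      PySem.List.mem_pyRange_one.mpr ⟨by omega, by omega⟩
    rw [getD_foldl_insert_mem _ _ _ _ _ hmem]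
    rw [← cand_dl matrix n r c (matrix.length : Int) _ hn hrb.1 hcb.1 (by omega) hcb.2]

-- ===== VERDICT (by name: the statement is the Claim_ definition above) =====
theorem find_max_product_sequence_spec : Claim_equal_find_max_product_sequence := by
  intro matrix n _ _
  unfold Spec_find_max_product_sequence
  by_cases hn0 : n ≤ 0
  · rw [A_nonpos matrix n hn0]
    simp only [find_max_product_sequence_alt, if_pos hn0]
  · have hn1 : 1 ≤ n := by omega
    by_cases hg : ((matrix.length : Int) < n ∧
        (if matrix.length ≠ 0 then ((matrix.headD []).length : Int) else 0) < n)
    · rw [A_toolarge matrix n hn1 hg.1 hg.2]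
      simp only [find_max_product_sequence_alt, if_neg hn0, if_pos hg]
    · exact AB_main matrix n hn1 hg
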